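-- pv_equiv track=rewrite | github.com/Euroswarms-Institute/LUAF | LUAF.py | _extract_json_object_spans
-- ===== SOURCE A (Python) =====
-- def _extract_json_object_spans(text: str) -> list[tuple[int, int]]:
--     if not text:
--         return []
--     spans, depth, start, i, in_str, esc, qc, n = ([], 0, None, 0, False, False, None, len(text))
--     while i < n:
--         c = text[i]
--         if esc:
--             esc = False
--             i += 1
--             continue
--         if c == '\\' and in_str:
--             esc = True
--             i += 1
--             continue
--         if c in ('"', "'") and (not esc):
--             if not in_str:
--                 in_str, qc = (True, c)
--             elif c == qc:
--                 in_str, qc = (False, None)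
--             i += 1
--             continue
--         if not in_str:
--             if c == '{':
--                 if depth == 0:
--                     start = i
--                 depth += 1
--             elif c == '}' and depth > 0:
--                 depth -= 1
--                 if depth == 0 and start is not None:
--                     spans.append((start, i + 1))
--         i += 1
--     return spans
-- ===== SOURCE B (Python) =====
-- def _extract_json_object_spans(text: str) -> list[tuple[int, int]]:
--     # Pass 1: mask everything string-related (quote delimiters, escapes,
--     # string contents) with a neutral placeholder, leaving other chars intact.
--     cleaned = []
--     in_str = False
--     esc = False
--     qc = None
--     for c in text:
--         if esc:
--             esc = False
--             cleaned.append(' ')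
--         elif c == '\\' and in_str:
--             esc = True
--             cleaned.append(' ')
--         elif c in ('"', "'"):
--             if not in_str:
--                 in_str, qc = True, c
--             elif c == qc:
--                 in_str, qc = False, None
--             cleaned.append(' ')
--         elif in_str:
--             cleaned.append(' ')
--         else:
--             cleaned.append(c)
--     # Pass 2: plain brace-depth scan over the cleaned text.
--     spans = []
--     depth = 0
--     start = 0
--     for i, c in enumerate(cleaned):
--         if c == '{':
--             if depth == 0:
--                 start = i
--             depth += 1
--         elif c == '}' and depth > 0:
--             depth -= 1
--             if depth == 0:
--                 spans.append((start, i + 1))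
--     return spans
-- ===== Notes on version B (the rewrite author's own statement) =====
-- stated objective: alternative
-- what changed: Replaces A's single interleaved scan (string-state and brace-depth tracked together with continue-driven control flow) by two separate passes: a masking pass that blanks all string-related characters, then a plain brace-depth scan over the cleaned text.
import Mathlib
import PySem

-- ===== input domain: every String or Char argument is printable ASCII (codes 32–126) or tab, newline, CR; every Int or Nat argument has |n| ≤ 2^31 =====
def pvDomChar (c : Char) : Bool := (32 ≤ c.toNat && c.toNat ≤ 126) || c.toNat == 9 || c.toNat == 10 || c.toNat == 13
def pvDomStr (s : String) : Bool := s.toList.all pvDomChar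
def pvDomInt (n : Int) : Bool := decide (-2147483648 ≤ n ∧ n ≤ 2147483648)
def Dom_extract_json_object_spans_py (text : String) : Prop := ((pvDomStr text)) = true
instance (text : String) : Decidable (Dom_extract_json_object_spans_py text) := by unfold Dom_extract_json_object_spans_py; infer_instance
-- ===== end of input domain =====

-- B replaces A's single interleaved scan by two separate passes (mask string characters, then a plain brace-depth scan); objective: alternative decomposition, same cost.


-- ===== PORT A =====
-- Literal transliteration of A's while-loop: one recursion over the chars,
-- carrying (spans, depth, start, in_str, esc, qc) exactly as the Python does.
def extractA_go (l : List Char) (i : Int) (spans : List (Int × Int)) (depth : Int)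
    (start : Option Int) (in_str esc : Bool) (qc : Option Char) : List (Int × Int) :=
  match l with
  | [] => spans
  | c :: rest =>
    if esc then
      extractA_go rest (i + 1) spans depth start in_str false qc
    else if (c == '\\') && in_str then
      extractA_go rest (i + 1) spans depth start in_str true qc
    else if (c == '"' || c == '\'') && !esc then
      if !in_str then
        extractA_go rest (i + 1) spans depth start true esc (some c)
      else if some c == qc then
        extractA_go rest (i + 1) spans depth start false esc none
      else
        extractA_go rest (i + 1) spans depth start in_str esc qc
    else if !in_str then
      if c == '{' then
        extractA_go rest (i + 1) spans (depth + 1)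
          (if depth == 0 then some i else start) in_str esc qc
      else if (c == '}') && (depth > 0) then
        if (depth - 1 == 0) then
          match start with
          | some s => extractA_go rest (i + 1) (spans ++ [(s, i + 1)]) (depth - 1) start in_str esc qc
          | none   => extractA_go rest (i + 1) spans (depth - 1) start in_str esc qc
        else
          extractA_go rest (i + 1) spans (depth - 1) start in_str esc qc
      else
        extractA_go rest (i + 1) spans depth start in_str esc qc
    else
      extractA_go rest (i + 1) spans depth start in_str esc qc

def extract_json_object_spans_py (text : String) : List (Int × Int) :=
  if text.toList = [] then []
  else extractA_go text.toList 0 [] 0 none false false none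

-- ===== PORT B =====
-- Pass 1 of Source B: mask string-related characters with ' '.
def maskB (l : List Char) (in_str esc : Bool) (qc : Option Char) : List Char :=
  match l with
  | [] => []
  | c :: rest =>
    if esc then ' ' :: maskB rest in_str false qc
    else if (c == '\\') && in_str then ' ' :: maskB rest in_str true qc
    else if (c == '"' || c == '\'') then
      if !in_str then ' ' :: maskB rest true esc (some c)
      else if some c == qc then ' ' :: maskB rest false esc none
      else ' ' :: maskB rest in_str esc qc
    else if in_str then ' ' :: maskB rest in_str esc qc
    else c :: maskB rest in_str esc qc

-- Pass 2 of Source B: brace-depth scan over the cleaned chars.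
def scanB (l : List Char) (i : Int) (spans : List (Int × Int)) (depth : Int)
    (start : Int) : List (Int × Int) :=
  match l with
  | [] => spans
  | c :: rest =>
    if c == '{' then
      scanB rest (i + 1) spans (depth + 1) (if depth == 0 then i else start)
    else if (c == '}') && (depth > 0) then
      if depth - 1 == 0 then scanB rest (i + 1) (spans ++ [(start, i + 1)]) (depth - 1) start
      else scanB rest (i + 1) spans (depth - 1) start
    else
      scanB rest (i + 1) spans depth start

def extract_json_object_spans_py_alt (text : String) : List (Int × Int) :=
  scanB (maskB text.toList false false none) 0 [] 0 0

-- ===== PRECONDITION & SPEC =====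
def Spec_extract_json_object_spans_py (text : String) (out : List (Int × Int)) : Prop := out = extract_json_object_spans_py_alt text
instance (text : String) (out : List (Int × Int)) : Decidable (Spec_extract_json_object_spans_py text out) := by unfold Spec_extract_json_object_spans_py; infer_instance

-- ===== CLAIM (what is proved, stated in full; the proofs are below) =====
def Claim_equal_extract_json_object_spans_py : Prop := ∀ (text : String), Dom_extract_json_object_spans_py text → Spec_extract_json_object_spans_py text (extract_json_object_spans_py text)

-- ===== LEMMAS AND PROOFS =====
-- A's interleaved scan equals B's depth scan over B's masked chars, provided
-- A's optional start agrees with B's start whenever depth is positive.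
lemma go_eq_scan_mask (l : List Char) : ∀ (i : Int) (spans : List (Int × Int))
    (depth : Int) (astart : Option Int) (bstart : Int) (in_str esc : Bool) (qc : Option Char),
    (depth > 0 → astart = some bstart) →
    extractA_go l i spans depth astart in_str esc qc
      = scanB (maskB l in_str esc qc) i spans depth bstart := by
  induction l with
  | nil => intro i spans depth astart bstart in_str esc qc _; simp [extractA_go, maskB, scanB]
  | cons c rest ih =>
    intro i spans depth astart bstart in_str esc qc hst
    by_cases hesc : esc
    · simp [extractA_go, maskB, scanB, hesc]
      exact ih _ _ _ _ _ _ _ _ hst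
    · by_cases hbs : (c == '\\') && in_str
      · simp [extractA_go, maskB, scanB, hesc, hbs]
        exact ih _ _ _ _ _ _ _ _ hst
      · by_cases hq : (c == '"' || c == '\'')
        · by_cases hin : in_str
          · have hc : ¬ c = '\\' := by simp [hin] at hbs; exact hbs
            by_cases hqc : some c == qc
            · simp [extractA_go, maskB, scanB, hesc, hc, hq, hin, hqc]
              exact ih _ _ _ _ _ _ _ _ hst
            · simp [extractA_go, maskB, scanB, hesc, hc, hq, hin, hqc]
              exact ih _ _ _ _ _ _ _ _ hst
          · simp [extractA_go, maskB, scanB, hesc, hq, hin]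
            exact ih _ _ _ _ _ _ _ _ hst
        · by_cases hin : in_str
          · have hc : ¬ c = '\\' := by simp [hin] at hbs; exact hbs
            simp [extractA_go, maskB, scanB, hesc, hc, hq, hin]
            exact ih _ _ _ _ _ _ _ _ hst
          · by_cases hopen : c == '{'
            · by_cases hd0 : depth = 0
              · simp [extractA_go, maskB, scanB, hesc, hq, hin, hopen, hd0]
                exact ih _ _ _ _ _ _ _ _ (fun _ => rfl)
              · simp [extractA_go, maskB, scanB, hesc, hq, hin, hopen, hd0]
                exact ih _ _ _ _ _ _ _ _ (fun hpos => hst (by omega))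
            · by_cases hclose : (c == '}') && (depth > 0)
              · have hdpos : depth > 0 := by
                  have := hclose; simp at this; exact this.2
                have hstart := hst hdpos
                by_cases hd1 : depth - 1 = 0
                · simp [extractA_go, maskB, scanB, hesc, hq, hin, hopen, hclose, hd1, hstart]
                  exact ih _ _ _ _ _ _ _ _ (fun h => absurd h (by omega))
                · simp [extractA_go, maskB, scanB, hesc, hq, hin, hopen, hclose, hd1, hstart]
                  exact ih _ _ _ _ _ _ _ _ (fun _ => rfl)
              · simp [extractA_go, maskB, scanB, hesc, hq, hin, hopen, hclose]
                exact ih _ _ _ _ _ _ _ _ hst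

-- ===== VERDICT (by name: the statement is the Claim_ definition above) =====
theorem extract_json_object_spans_py_spec : Claim_equal_extract_json_object_spans_py := by
  intro text _
  unfold Spec_extract_json_object_spans_py extract_json_object_spans_py extract_json_object_spans_py_alt
  by_cases h : text.toList = []
  · simp [h, maskB, scanB]
  · simp [h]
    exact go_eq_scan_mask _ _ _ _ _ _ _ _ _ (fun h => absurd h (by norm_num))
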